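-- pv_equiv track=rewrite | github.com/HongJunPyo0222/ps | baekjoon/202601/19269.py | nameCalc
-- ===== SOURCE A (Python) =====
-- def nameCalc(arr):
--     resArr = []
--     if len(arr) < 3:
--         return arr[0] * 10 + arr[1]
--     else:
--         for i in range(len(arr)-1):
--             k = arr[i]+ arr[i + 1]
--             if k >=10:
--                 resArr.append(k%10)
--             else:
--                 resArr.append(k)
--         return nameCalc(resArr)
-- ===== SOURCE B (Python) =====
-- def nameCalc(arr):
--     # Streaming diagonal DP: one left-to-right pass over arr, maintaining `rev`,
--     # the reductions of all suffixes of the prefix seen so far (shortest window first).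
--     rev = [arr[0]]
--     for x in arr[1:-1]:
--         acc = x
--         new = [x]
--         for u in rev:
--             t = u + acc
--             acc = t % 10 if t >= 10 else t
--             new.append(acc)
--         rev = new
--     acc = arr[-1]
--     for u in rev[:-1]:
--         t = u + acc
--         acc = t % 10 if t >= 10 else t
--     return rev[-1] * 10 + acc
-- ===== Notes on version B (the rewrite author's own statement) =====
-- stated objective: alternative
-- what changed: A repeatedly rebuilds the whole array by horizontal passes and recurses on the shrunken array; B makes a single left-to-right streaming pass over the input, maintaining the diagonal of suffix-window reductions, so the reduction triangle is traversed in a different (online, column-wise) order with no recursion and no per-pass array rebuilding.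
import Mathlib
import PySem

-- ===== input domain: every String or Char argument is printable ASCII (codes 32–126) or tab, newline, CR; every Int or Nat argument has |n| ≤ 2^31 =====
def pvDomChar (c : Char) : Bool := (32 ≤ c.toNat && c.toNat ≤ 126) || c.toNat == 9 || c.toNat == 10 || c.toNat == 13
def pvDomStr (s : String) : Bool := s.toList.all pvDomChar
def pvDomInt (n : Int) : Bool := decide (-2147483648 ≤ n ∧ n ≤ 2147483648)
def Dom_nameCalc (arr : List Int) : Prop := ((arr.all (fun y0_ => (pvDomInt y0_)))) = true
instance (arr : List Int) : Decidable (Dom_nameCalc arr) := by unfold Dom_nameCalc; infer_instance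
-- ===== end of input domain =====

-- B replaces A's repeated horizontal reduction passes (recursion on the shrunken array) by a single
-- left-to-right streaming pass maintaining the diagonal of suffix-window reductions: same values,
-- a different traversal order of the reduction triangle.

-- ===== PORT A =====
-- A's inner for-loop (building resArr from adjacent pairs); a named helper so the
-- recursion in nameCalc can cite passA_length for termination.
def passA (arr : List Int) : List Int :=
  (PySem.List.pyRange 0 ((arr.length : Int) - 1) 1).foldl
    (fun resArr i =>
      let k := (PySem.List.pyGet? arr i).getD 0 + (PySem.List.pyGet? arr (i + 1)).getD 0
      if k ≥ 10 then resArr ++ [PySem.Int.mod k 10] else resArr ++ [k]) []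

lemma passA_length (arr : List Int) : (passA arr).length = ((arr.length : Int) - 1).toNat := by
  unfold passA
  have hf : (fun (resArr : List Int) (i : Int) =>
      let k := (PySem.List.pyGet? arr i).getD 0 + (PySem.List.pyGet? arr (i + 1)).getD 0
      if k ≥ 10 then resArr ++ [PySem.Int.mod k 10] else resArr ++ [k])
    = (fun (resArr : List Int) (i : Int) =>
      resArr ++ [let k := (PySem.List.pyGet? arr i).getD 0 + (PySem.List.pyGet? arr (i + 1)).getD 0
                 if k ≥ 10 then PySem.Int.mod k 10 else k]) := by
    funext resArr i; dsimp only; split <;> rfl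
  rw [hf, PySem.List.foldl_append_singleton_eq_map]
  simp [PySem.List.length_pyRange_one]

-- the .getD 0 readings of arr[0] / arr[1] are exact under Pre_nameCalc (every index A uses is in range)
def nameCalc (arr : List Int) : Int :=
  if arr.length < 3 then
    (PySem.List.pyGet? arr 0).getD 0 * 10 + (PySem.List.pyGet? arr 1).getD 0
  else
    nameCalc (passA arr)
termination_by arr.length
decreasing_by
  rw [passA_length]; omega

-- ===== PORT B =====
def nameCalc_alt (arr : List Int) : Int :=
  let rev0 := [(PySem.List.pyGet? arr 0).getD 0]
  let rev := (PySem.List.slice arr (some 1) (some (-1))).foldl (fun rev x =>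
      ((rev.foldl (fun (st : List Int × Int) u =>
          let t := u + st.2
          let acc := if t ≥ 10 then PySem.Int.mod t 10 else t
          (st.1 ++ [acc], acc)) ([x], x))).1) rev0
  let acc0 := (PySem.List.pyGet? arr (-1)).getD 0
  let acc := (PySem.List.slice rev none (some (-1))).foldl (fun acc u =>
      let t := u + acc
      if t ≥ 10 then PySem.Int.mod t 10 else t) acc0
  (PySem.List.pyGet? rev (-1)).getD 0 * 10 + acc

-- ===== PRECONDITION & SPEC =====
-- A raises IndexError on lists of length < 2 (arr[0] / arr[1]); nothing else is excluded.
def Pre_nameCalc (arr : List Int) : Prop := 2 ≤ arr.length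
instance (arr : List Int) : Decidable (Pre_nameCalc arr) := by unfold Pre_nameCalc; infer_instance
def pvWitness_nameCalc : List Int := ([1, 2, 3, 4])

def Spec_nameCalc (arr : List Int) (out : Int) : Prop := out = nameCalc_alt arr
instance (arr : List Int) (out : Int) : Decidable (Spec_nameCalc arr out) := by unfold Spec_nameCalc; infer_instance

-- ===== CLAIM (what is proved, stated in full; the proofs are below) =====
def Claim_equal_nameCalc : Prop := ∀ (arr : List Int), Dom_nameCalc arr → Pre_nameCalc arr → Spec_nameCalc arr (nameCalc arr)

-- ===== LEMMAS AND PROOFS =====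

-- the step value both programs fold with
def pstep (a b : Int) : Int :=
  let k := a + b
  if k ≥ 10 then PySem.Int.mod k 10 else k

-- structural form of one reduction pass
def passS : List Int → List Int
  | a :: b :: t => pstep a b :: passS (b :: t)
  | _ => []

lemma passS_length : ∀ l : List Int, (passS l).length = l.length - 1 := by
  intro l
  induction l with
  | nil => rfl
  | cons a t ih =>
    cases t with
    | nil => rfl
    | cons b u => simp [passS] at ih ⊢; omega

-- the full reduction of a window to one value
def red1 : List Int → Int
  | [] => 0
  | [x] => x
  | a :: b :: t => red1 (passS (a :: b :: t))
termination_by l => l.length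
decreasing_by
  rw [passS_length]; simp

lemma map_range_pstep : ∀ (arr : List Int),
    (List.range (arr.length - 1)).map (fun (j : Nat) => pstep ((PySem.List.pyGet? arr ((j : Nat) : Int)).getD 0) ((PySem.List.pyGet? arr (((j : Nat) : Int)+1)).getD 0)) = passS arr := by
  intro arr
  induction arr with
  | nil => rfl
  | cons a t ih =>
    cases t with
    | nil => rfl
    | cons b u =>
      have hlen : (a :: b :: u).length - 1 = (u.length + 1) := by simp
      rw [hlen, List.range_succ_eq_map, List.map_cons, List.map_map]
      simp only [passS]
      refine congrArg₂ List.cons ?_ ?_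
      · simp
      · rw [← ih]
        have hlen2 : (b :: u).length - 1 = u.length := by simp
        rw [hlen2]
        apply List.map_congr_left
        intro j hj
        simp only [Function.comp]
        have h1 : ((Nat.succ j : Nat) : Int) = ((j : Nat) : Int) + 1 := by push_cast; ring
        have h2 : ((j : Nat) : Int) + 1 + 1 = (((j+2 : Nat)) : Int) := by push_cast; ring
        simp only [h1, h2, PySem.List.pyGet?_natCast]
        simp

lemma passA_eq_passS (arr : List Int) : passA arr = passS arr := by
  unfold passA
  have hf : (fun (resArr : List Int) (i : Int) =>
      let k := (PySem.List.pyGet? arr i).getD 0 + (PySem.List.pyGet? arr (i + 1)).getD 0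
      if k ≥ 10 then resArr ++ [PySem.Int.mod k 10] else resArr ++ [k])
    = (fun (resArr : List Int) (i : Int) =>
      resArr ++ [let k := (PySem.List.pyGet? arr i).getD 0 + (PySem.List.pyGet? arr (i + 1)).getD 0
                 if k ≥ 10 then PySem.Int.mod k 10 else k]) := by
    funext resArr i; dsimp only; split <;> rfl
  rw [hf, PySem.List.foldl_append_singleton_eq_map, PySem.List.pyRange_one, List.map_map]
  have hn : (((arr.length : Int) - 1) - 0).toNat = arr.length - 1 := by omega
  rw [hn, ← map_range_pstep arr]
  apply List.map_congr_left
  intro j hj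
  simp [pstep]

lemma red1_pass : ∀ l : List Int, 2 ≤ l.length → red1 (passS l) = red1 l := by
  intro l h
  match l with
  | a :: b :: t => rw [red1]

lemma passS_tail : ∀ l : List Int, passS l.tail = (passS l).tail := by
  intro l
  match l with
  | [] => rfl
  | [a] => rfl
  | a :: b :: t => rfl

lemma passS_dropLast : ∀ l : List Int, 2 ≤ l.length → passS l.dropLast = (passS l).dropLast := by
  intro l
  induction l with
  | nil => intro h; simp at h
  | cons a t ih =>
    cases t with
    | nil => intro h; simp at h
    | cons b u =>
      intro _
      cases u with
      | nil => rfl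
      | cons c v =>
        have h2 : 2 ≤ (b :: c :: v).length := by simp
        have := ih h2
        simp only [List.dropLast_cons₂, passS] at this ⊢
        rw [this]

-- CORE: the diagonal recurrence of the reduction triangle
lemma red1_core : ∀ (n : Nat) (l : List Int), l.length ≤ n → 2 ≤ l.length →
    red1 l = pstep (red1 l.dropLast) (red1 l.tail) := by
  intro n
  induction n with
  | zero => intro l h h2; omega
  | succ m ih =>
    intro l hlen h2
    match l with
    | [a, b] => simp [red1, passS]
    | a :: b :: c :: t =>
      rw [← red1_pass _ (by simp)]
      have hp2 : 2 ≤ (passS (a :: b :: c :: t)).length := by rw [passS_length]; simp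
      have hpm : (passS (a :: b :: c :: t)).length ≤ m := by rw [passS_length]; simp at hlen ⊢; omega
      rw [ih _ hpm hp2]
      rw [← passS_dropLast _ (by simp), ← passS_tail]
      rw [red1_pass _ (by simp), red1_pass _ (by simp)]

lemma red1_core' (l : List Int) (h : 2 ≤ l.length) :
    red1 l = pstep (red1 l.dropLast) (red1 l.tail) := red1_core l.length l le_rfl h

-- A computes the two final digits as reductions of dropLast / tail
lemma nameCalc_eq_red1 : ∀ (n : Nat) (arr : List Int), arr.length ≤ n → 2 ≤ arr.length →
    nameCalc arr = red1 arr.dropLast * 10 + red1 arr.tail := by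
  intro n
  induction n with
  | zero => intro l h h2; omega
  | succ m ih =>
    intro arr hlen h2
    match arr with
    | [a, b] =>
      rw [nameCalc]
      simp [red1, PySem.List.pyGet?, PySem.List.pyIdx?]
    | a :: b :: c :: t =>
      rw [nameCalc]
      have hnot : ¬ (a :: b :: c :: t).length < 3 := by simp
      rw [if_neg hnot, passA_eq_passS]
      have hp2 : 2 ≤ (passS (a :: b :: c :: t)).length := by rw [passS_length]; simp
      have hpm : (passS (a :: b :: c :: t)).length ≤ m := by rw [passS_length]; simp at hlen ⊢; omega
      rw [ih _ hpm hp2]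
      rw [← passS_dropLast _ (by simp), ← passS_tail]
      rw [red1_pass _ (by simp), red1_pass _ (by simp)]

-- the suffixes of p, shortest first (B's rev holds their red1 images)
def sufx : List Int → List (List Int)
  | [] => []
  | a :: t => sufx t ++ [a :: t]

lemma red1_concat (a : Int) (t : List Int) (x : Int) :
    red1 (a :: (t ++ [x])) = pstep (red1 (a :: t)) (red1 (t ++ [x])) := by
  have h2 : 2 ≤ (a :: (t ++ [x])).length := by simp
  rw [red1_core' _ h2]
  congr 1
  · congr 1
    rw [List.dropLast_cons_of_ne_nil (by simp), List.dropLast_concat]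

-- B's inner pair-fold advances the diagonal by one element
lemma inner_fold : ∀ (p : List Int) (x : Int),
    ((sufx p).map red1).foldl (fun (st : List Int × Int) u =>
        let t := u + st.2
        let acc := if t ≥ 10 then PySem.Int.mod t 10 else t
        (st.1 ++ [acc], acc)) ([x], x)
      = ((sufx (p ++ [x])).map red1, red1 (p ++ [x])) := by
  intro p
  induction p with
  | nil => intro x; simp [sufx, red1]
  | cons a t ih =>
    intro x
    simp only [sufx, List.map_append, List.foldl_append, ih]
    simp only [List.map_cons, List.map_nil, List.foldl_cons, List.foldl_nil]
    have key : (if red1 (a :: t) + red1 (t ++ [x]) ≥ 10 then PySem.Int.mod (red1 (a :: t) + red1 (t ++ [x])) 10 else red1 (a :: t) + red1 (t ++ [x])) = red1 (a :: (t ++ [x])) := by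
      rw [red1_concat]; rfl
    rw [key]
    simp [sufx]

-- B's final acc-only fold
lemma inner_fold_acc : ∀ (p : List Int) (x : Int),
    ((sufx p).map red1).foldl (fun acc u =>
        let t := u + acc
        if t ≥ 10 then PySem.Int.mod t 10 else t) x
      = red1 (p ++ [x]) := by
  intro p
  induction p with
  | nil => intro x; simp [sufx, red1]
  | cons a t ih =>
    intro x
    simp only [sufx, List.map_append, List.foldl_append, ih]
    simp only [List.map_cons, List.map_nil, List.foldl_cons, List.foldl_nil]
    rw [List.cons_append, red1_concat]
    rfl

-- B's outer fold grows the processed prefix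
lemma outer_fold (m : List Int) : ∀ p : List Int,
    m.foldl (fun rev x =>
      ((rev.foldl (fun (st : List Int × Int) u =>
          let t := u + st.2
          let acc := if t ≥ 10 then PySem.Int.mod t 10 else t
          (st.1 ++ [acc], acc)) ([x], x))).1) ((sufx p).map red1)
      = (sufx (p ++ m)).map red1 := by
  induction m with
  | nil => intro p; simp
  | cons x m' ih =>
    intro p
    rw [List.foldl_cons]
    have h1 : (((sufx p).map red1).foldl (fun (st : List Int × Int) u =>
          let t := u + st.2
          let acc := if t ≥ 10 then PySem.Int.mod t 10 else t
          (st.1 ++ [acc], acc)) ([x], x)).1 = (sufx (p ++ [x])).map red1 := by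
      rw [inner_fold]
    rw [h1, ih (p ++ [x]), List.append_assoc]
    rfl

lemma sufx_map_getLast (a : Int) (t : List Int) :
    ((sufx (a :: t)).map red1).getLast? = some (red1 (a :: t)) := by
  simp [sufx]

lemma sufx_map_dropLast (a : Int) (t : List Int) :
    ((sufx (a :: t)).map red1).dropLast = (sufx t).map red1 := by
  simp [sufx]

lemma slice_one_neg_one (arr : List Int) (h : 2 ≤ arr.length) :
    PySem.List.slice arr (some 1) (some (-1)) = arr.tail.dropLast := by
  simp [PySem.List.slice]
  have h1 : min 1 arr.length = 1 := by omega
  rw [h1, List.drop_one, List.dropLast_eq_take]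
  congr 1
  simp

lemma nameCalc_alt_eq_red1 : ∀ arr : List Int, 2 ≤ arr.length →
    nameCalc_alt arr = red1 arr.dropLast * 10 + red1 arr.tail := by
  intro arr h
  cases arr with
  | nil => simp at h
  | cons a t =>
    rcases List.eq_nil_or_concat t with rfl | ⟨qt, x, rfl⟩
    · simp at h
    · simp only [List.concat_eq_append] at h ⊢
      simp only [nameCalc_alt]
      have e0 : (PySem.List.pyGet? (a :: (qt ++ [x])) 0).getD 0 = a := by
        rw [PySem.List.pyGet?_zero_cons]; rfl
      rw [e0]
      rw [slice_one_neg_one _ (by simp)]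
      have etail : (a :: (qt ++ [x])).tail.dropLast = qt := by simp
      rw [etail]
      have erev0 : [a] = (sufx [a]).map red1 := by simp [sufx, red1]
      rw [erev0, outer_fold]
      have eacc0 : (PySem.List.pyGet? (a :: (qt ++ [x])) (-1)).getD 0 = x := by
        rw [show (a :: (qt ++ [x])) = (a :: qt) ++ [x] by simp,
            PySem.List.pyGet?_neg_one_append_singleton]; rfl
      rw [eacc0]
      rw [show ([a] ++ qt) = a :: qt by rfl]
      rw [PySem.List.slice_to_neg_one, sufx_map_dropLast, inner_fold_acc]
      rw [PySem.List.pyGet?_neg_one, sufx_map_getLast]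
      have ed : (a :: (qt ++ [x])).dropLast = a :: qt := by
        rw [List.dropLast_cons_of_ne_nil (by simp), List.dropLast_concat]
      rw [ed]
      rfl

-- ===== VERDICT (by name: the statement is the Claim_ definition above) =====
theorem nameCalc_spec : Claim_equal_nameCalc := by
  intro arr _ hpre
  unfold Spec_nameCalc
  rw [nameCalc_eq_red1 arr.length arr le_rfl hpre, nameCalc_alt_eq_red1 arr hpre]
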